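-- pv_equiv track=rewrite | github.com/karlasophiacruz/PAA-2021.1 | Lista 5/l5q6.py | custominimo
-- ===== SOURCE A (Python) =====
-- def custominimo(m, n, i):
--     if len(m) == 1: # Fim da recursão, caso só haja 1 corte...
--         return n # retorna o próprio tamanho da String
--
--     c_e = 0 # Custo do lado esquerdo
--     c_d = 0 # Custo do lado direito
--
--     # Aplica o algoritmo de dividir e conquistar para calcular o custo
--     if i > 0: # Recursão para o lado esquerdo, caso seja positivo...
--         c_e = 10000000
--         m_e = m[0 : i]
--         nl = m[i]
--
--         for j in range(len(m_e)):
--             c_e = min(custominimo(m_e, nl, j), c_e)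
--
--     if i < (len(m) - 1): # Recursão para o lado direito, caso seja menor que o tamanho...
--         c_d = 10000000
--         m_d = m[(i + 1) : len(m)]
--         nr = n - m[i]
--
--         for j in range(len(m_d)):
--             m_d[j] -= m[i]
--
--         for j in range(len(m_d)):
--             c_d = min(custominimo(m_d, nr, j), c_d)
--
--     # Retorna o custo total mínimo
--     return n + c_e + c_d
-- ===== SOURCE B (Python) =====
-- def custominimo(m, n, i):
--     # Interval DP (matrix-chain style): bottom-up table over index subintervals
--     # instead of A's exponential divide-and-conquer on copied, shifted sublists.
--     k = len(m)
--     if k == 1: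
--         return n
--     ecap = {}  # ecap[(lo, hi)] = min(10**7, min cost of first cut of segment m[lo:hi])
--     for span in range(1, k + 1):
--         for lo in range(0, k - span + 1):
--             hi = lo + span
--             left = 0 if lo == 0 else m[lo - 1]
--             right = n if hi == k else m[hi]
--             length = right - left
--             best = 10000000
--             for j in range(lo, hi):
--                 c = length
--                 if j > lo:
--                     c = c + ecap[(lo, j)]
--                 if j < hi - 1:
--                     c = c + ecap[(j + 1, hi)]
--                 if c < best:
--                     best = c
--             ecap[(lo, hi)] = best
--     total = n
--     if i > 0:
--         total = total + ecap[(0, i)]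
--     if i < k - 1:
--         total = total + ecap[(i + 1, k)]
--     return total
-- ===== Notes on version B (the rewrite author's own statement) =====
-- stated objective: faster
-- what changed: Replaces A's exponential divide-and-conquer recursion on copied, shifted sublists by a bottom-up interval DP (matrix-chain style) over index subintervals of the original list, memoized in a dict.
-- outside the precondition, e.g. on custominimo([2, 5], 7, -1): A returns 9, B returns 19; on custominimo([1, 2, 3], 10, -2): A returns 18, B raises KeyError
import Mathlib
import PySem

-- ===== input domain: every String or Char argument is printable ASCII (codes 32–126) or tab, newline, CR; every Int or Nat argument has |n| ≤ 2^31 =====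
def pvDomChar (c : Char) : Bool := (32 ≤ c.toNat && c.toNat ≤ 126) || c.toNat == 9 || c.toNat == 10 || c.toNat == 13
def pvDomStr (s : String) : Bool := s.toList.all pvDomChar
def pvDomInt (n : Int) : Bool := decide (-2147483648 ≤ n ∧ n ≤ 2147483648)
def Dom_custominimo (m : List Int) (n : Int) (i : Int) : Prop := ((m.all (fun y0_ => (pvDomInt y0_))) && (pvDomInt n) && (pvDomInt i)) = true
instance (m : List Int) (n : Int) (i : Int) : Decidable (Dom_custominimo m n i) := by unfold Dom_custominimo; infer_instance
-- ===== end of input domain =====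

-- B replaces A's exponential divide-and-conquer on copied shifted sublists by a bottom-up
-- interval DP over index subintervals (matrix-chain style), for an asymptotic speed-up.

-- ===== PORT A =====
-- literal transliteration of A, with a fuel counter making the recursion total
-- (fuel m.length + 1 is never exhausted on inputs satisfying Pre_); the in-place
-- loop 'for j: m_d[j] -= m[i]' is ported as the elementwise map it performs.
def custoA : Nat → List Int → Int → Int → Int
  | 0, _, _, _ => 0
  | fuel+1, m, n, i =>
    if m.length = 1 then n
    else
      let c_e : Int :=
        if i > 0 then
          let m_e := PySem.List.slice m (some 0) (some i)
          let nl := PySem.List.pyGetD m i 0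
          (PySem.List.pyRange 0 (m_e.length : Int) 1).foldl
            (fun c j => min (custoA fuel m_e nl j) c) 10000000
        else 0
      let c_d : Int :=
        if i < (m.length : Int) - 1 then
          let m_d0 := PySem.List.slice m (some (i+1)) (some (m.length : Int))
          let nr := n - PySem.List.pyGetD m i 0
          let m_d := m_d0.map (fun x => x - PySem.List.pyGetD m i 0)
          (PySem.List.pyRange 0 (m_d.length : Int) 1).foldl
            (fun c j => min (custoA fuel m_d nr j) c) 10000000
        else 0
      n + c_e + c_d

def custominimo (m : List Int) (n : Int) (i : Int) : Int := custoA (m.length + 1) m n i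

-- ===== PORT B =====
-- transliteration of Source B: bottom-up interval DP; each loop body of Source B is a named
-- helper (altBest = the innermost j-loop, altInner = the lo-loop body, altOuter = the
-- span-loop body); the Python dict accesses ecap[(lo,j)] always hit present keys,
-- ported as getD with default 0.
def altBest (m : List Int) (n k : Int) (d : PySem.Dict (Int × Int) Int) (lo hi : Int) : Int :=
  let left : Int := if lo = 0 then 0 else PySem.List.pyGetD m (lo-1) 0
  let right : Int := if hi = k then n else PySem.List.pyGetD m hi 0
  let length := right - left
  (PySem.List.pyRange lo hi 1).foldl (fun best j =>
    let c := length
    let c := if j > lo then c + d.getD (lo, j) 0 else c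
    let c := if j < hi - 1 then c + d.getD (j+1, hi) 0 else c
    if c < best then c else best) 10000000

def altInner (m : List Int) (n k span : Int) (d : PySem.Dict (Int × Int) Int) (lo : Int) :
    PySem.Dict (Int × Int) Int :=
  d.insert (lo, lo+span) (altBest m n k d lo (lo+span))

def altOuter (m : List Int) (n k : Int) (d : PySem.Dict (Int × Int) Int) (span : Int) :
    PySem.Dict (Int × Int) Int :=
  (PySem.List.pyRange 0 (k - span + 1) 1).foldl (altInner m n k span) d

def custominimo_alt (m : List Int) (n : Int) (i : Int) : Int :=
  let k : Int := (m.length : Int)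
  if m.length = 1 then n
  else
    let ecap := (PySem.List.pyRange 1 (k+1) 1).foldl (altOuter m n k) PySem.Dict.empty
    let total := n
    let total := if i > 0 then total + ecap.getD (0, i) 0 else total
    let total := if i < k - 1 then total + ecap.getD (i+1, k) 0 else total
    total

-- ===== PRECONDITION & SPEC =====
-- Pre_ admits the natural domain of the task — a valid cut index 0 ≤ i < len(m) — plus the
-- i-independent corners (len(m) = 1, and m = [] with i ∈ {-1,0}); outside it A either raises
-- IndexError (out-of-range i) or, for -len(m) ≤ i < 0 with len(m) ≥ 2, returns a value that
-- is an artefact of Python's negative-index wraparound, which B does not reproduce.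
def Pre_custominimo (m : List Int) (n : Int) (i : Int) : Prop :=
  (0 ≤ i ∧ i < (m.length : Int)) ∨ m.length = 1 ∨ (m = [] ∧ -1 ≤ i ∧ i ≤ 0)
instance (m : List Int) (n : Int) (i : Int) : Decidable (Pre_custominimo m n i) := by
  unfold Pre_custominimo; infer_instance

def pvWitness_custominimo : List Int × Int × Int := ([3, 7, 10], 15, 1)

def Spec_custominimo (m : List Int) (n : Int) (i : Int) (out : Int) : Prop := out = custominimo_alt m n i
instance (m : List Int) (n : Int) (i : Int) (out : Int) : Decidable (Spec_custominimo m n i out) := by unfold Spec_custominimo; infer_instance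

-- ===== CLAIM (what is proved, stated in full; the proofs are below) =====
def Claim_equal_custominimo : Prop := ∀ (m : List Int) (n : Int) (i : Int), Dom_custominimo m n i → Pre_custominimo m n i → Spec_custominimo m n i (custominimo m n i)

-- ===== LEMMAS AND PROOFS =====

-- boundary values of the index interval (lo, hi) of m (length parameter n)
def pvLb (m : List Int) (lo : Int) : Int :=
  if lo = 0 then 0 else PySem.List.pyGetD m (lo-1) 0
def pvRb (m : List Int) (n : Int) (hi : Int) : Int :=
  if hi = (m.length : Int) then n else PySem.List.pyGetD m hi 0

-- capped minimal cost of fully cutting segment (lo, hi), fuel-indexed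
def pvVf (m : List Int) (n : Int) : Nat → Int → Int → Int
  | 0, _, _ => 10000000
  | f+1, lo, hi =>
      (PySem.List.pyRange lo hi 1).foldl
        (fun best j =>
          min (pvRb m n hi - pvLb m lo
                + (if lo < j then pvVf m n f lo j else 0)
                + (if j < hi - 1 then pvVf m n f (j+1) hi else 0)) best)
        10000000

def pvV (m : List Int) (n : Int) (lo hi : Int) : Int := pvVf m n (hi - lo).toNat lo hi

theorem pvVf_mono (m : List Int) (n : Int) :
    ∀ s : Nat, ∀ f₁ f₂ lo hi, (hi - lo).toNat = s → s ≤ f₁ → s ≤ f₂ →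
      pvVf m n f₁ lo hi = pvVf m n f₂ lo hi := by
  intro s
  induction s using Nat.strong_induction_on with
  | _ s IH =>
    intro f₁ f₂ lo hi hspan h1 h2
    by_cases hlt : lo < hi
    · obtain ⟨g₁, rfl⟩ : ∃ g, f₁ = g+1 := ⟨f₁-1, by omega⟩
      obtain ⟨g₂, rfl⟩ : ∃ g, f₂ = g+1 := ⟨f₂-1, by omega⟩
      simp only [pvVf]
      apply PySem.List.foldl_congr_mem
      intro acc j hj
      rw [PySem.List.mem_pyRange_one] at hj
      have e1 : (if lo < j then pvVf m n g₁ lo j else 0)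
          = (if lo < j then pvVf m n g₂ lo j else 0) := by
        split_ifs with h
        · exact IH (j-lo).toNat (by omega) g₁ g₂ lo j rfl (by omega) (by omega)
        · rfl
      have e2 : (if j < hi - 1 then pvVf m n g₁ (j+1) hi else 0)
          = (if j < hi - 1 then pvVf m n g₂ (j+1) hi else 0) := by
        split_ifs with h
        · exact IH (hi-(j+1)).toNat (by omega) g₁ g₂ (j+1) hi rfl (by omega) (by omega)
        · rfl
      rw [e1, e2]
    · have hemp : ∀ f, pvVf m n f lo hi = 10000000 := by
        intro f
        cases f with
        | zero => rfl
        | succ g => simp [pvVf, PySem.List.pyRange_one_eq_nil (by omega : hi ≤ lo)]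
      rw [hemp, hemp]

theorem pvV_unfold (m : List Int) (n : Int) (lo hi : Int) (h : lo < hi) :
    pvV m n lo hi =
      (PySem.List.pyRange lo hi 1).foldl
        (fun best j =>
          min (pvRb m n hi - pvLb m lo
                + (if lo < j then pvV m n lo j else 0)
                + (if j < hi - 1 then pvV m n (j+1) hi else 0)) best)
        10000000 := by
  have hs : (hi - lo).toNat = ((hi - lo).toNat - 1) + 1 := by omega
  unfold pvV
  rw [hs]
  simp only [pvVf]
  apply PySem.List.foldl_congr_mem
  intro acc j hj
  rw [PySem.List.mem_pyRange_one] at hj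
  have e1 : (if lo < j then pvVf m n ((hi - lo).toNat - 1) lo j else 0)
      = (if lo < j then pvVf m n (j - lo).toNat lo j else 0) := by
    split_ifs with h0
    · exact pvVf_mono m n (j-lo).toNat _ _ lo j rfl (by omega) (by omega)
    · rfl
  have e2 : (if j < hi - 1 then pvVf m n ((hi - lo).toNat - 1) (j+1) hi else 0)
      = (if j < hi - 1 then pvVf m n (hi - (j+1)).toNat (j+1) hi else 0) := by
    split_ifs with h0
    · exact pvVf_mono m n (hi-(j+1)).toNat _ _ (j+1) hi rfl (by omega) (by omega)
    · rfl
  rw [e1, e2]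

theorem pvRange_off (a b : Int) :
    PySem.List.pyRange a b 1 = (PySem.List.pyRange 0 (b-a) 1).map (· + a) := by
  rw [PySem.List.pyRange_one, PySem.List.pyRange_one, List.map_map]
  have h : b - a - 0 = b - a := by ring
  rw [h]
  exact List.map_congr_left (fun k _ => by simp; ring)

-- the left recursion (take i, new length m[i]) computes pvV of the original list
theorem pvV_take (m : List Int) (n : Int) (t : Int) (h0 : 0 ≤ t) (ht : t < (m.length : Int)) :
    ∀ f lo hi, 0 ≤ lo → hi ≤ t →
      pvVf (m.take t.toNat) (PySem.List.pyGetD m t 0) f lo hi = pvVf m n f lo hi := by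
  intro f
  induction f with
  | zero => intro lo hi _ _; rfl
  | succ f IH =>
    intro lo hi hlo hhi
    simp only [pvVf]
    apply PySem.List.foldl_congr_mem
    intro acc j hj
    rw [PySem.List.mem_pyRange_one] at hj
    have hlen : ((m.take t.toNat).length : Int) = t := by
      simp [List.length_take]
      omega
    have hget : ∀ x : Int, 0 ≤ x → x < t →
        PySem.List.pyGetD (m.take t.toNat) x 0 = PySem.List.pyGetD m x 0 := by
      intro x hx0 hxt
      rw [PySem.List.pyGetD_eq_getElem _ 0 hx0 (by omega),
          PySem.List.pyGetD_eq_getElem _ 0 hx0 (by omega)]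
      exact List.getElem_take
    have hRb : pvRb (m.take t.toNat) (PySem.List.pyGetD m t 0) hi = pvRb m n hi := by
      unfold pvRb
      rw [hlen]
      by_cases hc : hi = t
      · subst hc
        rw [if_pos rfl, if_neg (by omega : ¬ hi = ((m.length : Nat) : Int))]
      · rw [if_neg hc, if_neg (by omega : ¬ hi = ((m.length : Nat) : Int))]
        exact hget hi (by omega) (by omega)
    have hLb : pvLb (m.take t.toNat) lo = pvLb m lo := by
      unfold pvLb
      by_cases hc : lo = 0
      · rw [if_pos hc, if_pos hc]
      · rw [if_neg hc, if_neg hc]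
        exact hget (lo-1) (by omega) (by omega)
    have e1 : (if lo < j then pvVf (m.take t.toNat) (PySem.List.pyGetD m t 0) f lo j else 0)
        = (if lo < j then pvVf m n f lo j else 0) := by
      split_ifs with h0
      · exact IH lo j hlo (by omega)
      · rfl
    have e2 : (if j < hi - 1 then pvVf (m.take t.toNat) (PySem.List.pyGetD m t 0) f (j+1) hi else 0)
        = (if j < hi - 1 then pvVf m n f (j+1) hi else 0) := by
      split_ifs with h0
      · exact IH (j+1) hi (by omega) hhi
      · rfl
    rw [hRb, hLb, e1, e2]

-- the right recursion (drop s, shift by m[s-1], new length n - m[s-1]) computes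
-- pvV of the original list on the translated interval
theorem pvV_shift (m : List Int) (n : Int) (s : Int) (h1 : 1 ≤ s) (hs : s ≤ (m.length : Int)) :
    ∀ f lo hi, 0 ≤ lo → hi ≤ (m.length : Int) - s →
      pvVf ((m.drop s.toNat).map (fun x => x - PySem.List.pyGetD m (s-1) 0))
           (n - PySem.List.pyGetD m (s-1) 0) f lo hi
        = pvVf m n f (lo+s) (hi+s) := by
  intro f
  induction f with
  | zero => intro lo hi _ _; rfl
  | succ f IH =>
    intro lo hi hlo hhi
    simp only [pvVf]
    rw [pvRange_off lo hi, pvRange_off (lo+s) (hi+s),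
        (by ring : hi + s - (lo + s) = hi - lo), List.foldl_map, List.foldl_map]
    apply PySem.List.foldl_congr_mem
    intro acc j hj
    rw [PySem.List.mem_pyRange_one] at hj
    have hmdlen : ((((m.drop s.toNat).map (fun x => x - PySem.List.pyGetD m (s-1) 0)).length : Nat) : Int)
        = (m.length : Int) - s := by
      simp [List.length_drop]
      omega
    have hgetmd : ∀ x : Int, 0 ≤ x → x < (m.length : Int) - s →
        PySem.List.pyGetD ((m.drop s.toNat).map (fun x => x - PySem.List.pyGetD m (s-1) 0)) x 0
          = PySem.List.pyGetD m (x+s) 0 - PySem.List.pyGetD m (s-1) 0 := by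
      intro x hx0 hx1
      have hxs : (0:Int) ≤ x + s := by omega
      have hxs2 : x + s < ((m.length : Nat) : Int) := by omega
      rw [PySem.List.pyGetD_eq_getElem _ 0 hx0 (by omega),
          PySem.List.pyGetD_eq_getElem m 0 hxs hxs2]
      simp only [List.getElem_map, List.getElem_drop]
      congr 2
      omega
    have hRb : pvRb ((m.drop s.toNat).map (fun x => x - PySem.List.pyGetD m (s-1) 0))
          (n - PySem.List.pyGetD m (s-1) 0) hi = pvRb m n (hi+s) - PySem.List.pyGetD m (s-1) 0 := by
      unfold pvRb
      rw [hmdlen]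
      by_cases hcase : hi = (m.length : Int) - s
      · rw [if_pos hcase, if_pos (by omega : hi + s = ((m.length : Nat) : Int))]
      · rw [if_neg hcase, if_neg (by omega : ¬ hi + s = ((m.length : Nat) : Int))]
        exact hgetmd hi (by omega) (by omega)
    have hLb : pvLb ((m.drop s.toNat).map (fun x => x - PySem.List.pyGetD m (s-1) 0)) lo
        = pvLb m (lo+s) - PySem.List.pyGetD m (s-1) 0 := by
      unfold pvLb
      by_cases hl : lo = 0
      · subst hl
        rw [if_pos rfl, if_neg (by omega : ¬ (0:Int) + s = 0),
            (by ring : (0:Int) + s - 1 = s - 1)]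
        ring
      · rw [if_neg hl, if_neg (by omega : ¬ lo + s = 0),
          hgetmd (lo-1) (by omega) (by omega), (by ring : lo - 1 + s = lo + s - 1)]
    have key : pvRb ((m.drop s.toNat).map (fun x => x - PySem.List.pyGetD m (s-1) 0))
            (n - PySem.List.pyGetD m (s-1) 0) hi
          - pvLb ((m.drop s.toNat).map (fun x => x - PySem.List.pyGetD m (s-1) 0)) lo
          + (if lo < j+lo then pvVf ((m.drop s.toNat).map (fun x => x - PySem.List.pyGetD m (s-1) 0))
               (n - PySem.List.pyGetD m (s-1) 0) f lo (j+lo) else 0)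
          + (if j+lo < hi-1 then pvVf ((m.drop s.toNat).map (fun x => x - PySem.List.pyGetD m (s-1) 0))
               (n - PySem.List.pyGetD m (s-1) 0) f (j+lo+1) hi else 0)
        = pvRb m n (hi+s) - pvLb m (lo+s)
          + (if lo+s < j+(lo+s) then pvVf m n f (lo+s) (j+(lo+s)) else 0)
          + (if j+(lo+s) < hi+s-1 then pvVf m n f (j+(lo+s)+1) (hi+s) else 0) := by
      rw [hRb, hLb]
      have i1 : (if lo+s < j+(lo+s) then pvVf m n f (lo+s) (j+(lo+s)) else 0)
          = (if lo < j+lo then pvVf m n f (lo+s) ((j+lo)+s) else 0) := by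
        rw [(by ring : j+(lo+s) = (j+lo)+s)]
        exact if_congr (by omega) rfl rfl
      have i2 : (if j+(lo+s) < hi+s-1 then pvVf m n f (j+(lo+s)+1) (hi+s) else 0)
          = (if j+lo < hi-1 then pvVf m n f ((j+lo+1)+s) (hi+s) else 0) := by
        rw [(by ring : j+(lo+s)+1 = (j+lo+1)+s), (by ring : j+(lo+s) = (j+lo)+s)]
        exact if_congr (by omega) rfl rfl
      rw [i1, i2]
      have v1 : (if lo < j+lo then pvVf ((m.drop s.toNat).map (fun x => x - PySem.List.pyGetD m (s-1) 0))
               (n - PySem.List.pyGetD m (s-1) 0) f lo (j+lo) else 0)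
          = (if lo < j+lo then pvVf m n f (lo+s) ((j+lo)+s) else 0) := by
        split_ifs with h
        · exact IH lo (j+lo) hlo (by omega)
        · rfl
      have v2 : (if j+lo < hi-1 then pvVf ((m.drop s.toNat).map (fun x => x - PySem.List.pyGetD m (s-1) 0))
               (n - PySem.List.pyGetD m (s-1) 0) f (j+lo+1) hi else 0)
          = (if j+lo < hi-1 then pvVf m n f ((j+lo+1)+s) (hi+s) else 0) := by
        split_ifs with h
        · exact IH (j+lo+1) hi (by omega) hhi
        · rfl
      rw [v1, v2]
      ring
    exact congrArg (fun z => min z acc) key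

theorem pvV_take' (m : List Int) (n t : Int) (h0 : 0 ≤ t) (ht : t < ((m.length : Nat) : Int))
    (lo hi : Int) (hlo : 0 ≤ lo) (hhi : hi ≤ t) :
    pvV (m.take t.toNat) (PySem.List.pyGetD m t 0) lo hi = pvV m n lo hi := by
  unfold pvV
  exact pvV_take m n t h0 ht _ lo hi hlo hhi

theorem pvV_shift'' (m : List Int) (n q : Int) (h0 : 0 ≤ q) (hq : q < ((m.length : Nat) : Int))
    (lo hi : Int) (hlo : 0 ≤ lo) (hhi : hi ≤ ((m.length : Nat) : Int) - (q+1)) :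
    pvV ((m.drop (q+1).toNat).map (fun x => x - PySem.List.pyGetD m q 0))
        (n - PySem.List.pyGetD m q 0) lo hi
      = pvV m n (lo+(q+1)) (hi+(q+1)) := by
  have h := pvV_shift m n (q+1) (by omega) (by omega) ((hi-lo).toNat) lo hi hlo hhi
  rw [(by ring : q+1-1 = q)] at h
  unfold pvV
  rw [(by ring : hi+(q+1)-(lo+(q+1)) = hi-lo)]
  exact h

theorem custoA_eq (fuel : Nat) :
    ∀ (m : List Int) (n i : Int), m.length ≤ fuel → 0 ≤ i → i < (m.length : Int) →
      custoA fuel m n i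
        = n + (if 0 < i then pvV m n 0 i else 0)
            + (if i < (m.length : Int) - 1 then pvV m n (i+1) (m.length : Int) else 0) := by
  induction fuel with
  | zero =>
    intro m n i hlen h0 hi
    exfalso
    omega
  | succ f IH =>
    intro m n i hlen h0 hi
    by_cases h1 : m.length = 1
    · have hi0 : i = 0 := by omega
      subst hi0
      simp only [custoA, h1]
      norm_num
    · simp only [custoA, if_neg h1]
      have hE : (if i > 0 then
            (PySem.List.pyRange 0 (((PySem.List.slice m (some 0) (some i)).length : Nat) : Int) 1).foldl
              (fun c j => min (custoA f (PySem.List.slice m (some 0) (some i))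
                (PySem.List.pyGetD m i 0) j) c) 10000000
          else 0) = (if 0 < i then pvV m n 0 i else 0) := by
        split_ifs with hpos
        · have hsl : PySem.List.slice m (some 0) (some i) = m.take i.toNat := by
            rw [PySem.List.slice_zero_start, PySem.List.slice_to m h0]
          rw [hsl]
          have hlt : (((m.take i.toNat).length : Nat) : Int) = i := by
            simp [List.length_take]
            omega
          rw [hlt, pvV_unfold m n 0 i hpos]
          apply PySem.List.foldl_congr_mem
          intro acc j hj
          rw [PySem.List.mem_pyRange_one] at hj
          have hrec := IH (m.take i.toNat) (PySem.List.pyGetD m i 0) j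
            (by simp [List.length_take]; omega) hj.1 (by rw [hlt]; exact hj.2)
          rw [hrec, hlt]
          have b1 : pvRb m n i = PySem.List.pyGetD m i 0 := by
            unfold pvRb
            rw [if_neg (by omega)]
          have b2 : pvLb m 0 = 0 := by
            unfold pvLb
            rw [if_pos rfl]
          have t1 : (if 0 < j then pvV (m.take i.toNat) (PySem.List.pyGetD m i 0) 0 j else 0)
              = (if 0 < j then pvV m n 0 j else 0) := by
            split_ifs with h
            · exact pvV_take' m n i h0 hi 0 j le_rfl (by omega)
            · rfl
          have t2 : (if j < i - 1 then pvV (m.take i.toNat) (PySem.List.pyGetD m i 0) (j+1) i else 0)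
              = (if j < i - 1 then pvV m n (j+1) i else 0) := by
            split_ifs with h
            · exact pvV_take' m n i h0 hi (j+1) i (by omega) le_rfl
            · rfl
          rw [t1, t2, b1, b2]
          exact congrArg (fun z => min z acc) (by ring)
        · rfl
      rw [hE]
      have hD : (if i < (m.length : Int) - 1 then
            (PySem.List.pyRange 0
              ((((PySem.List.slice m (some (i+1)) (some ((m.length : Nat) : Int))).map
                  (fun x => x - PySem.List.pyGetD m i 0)).length : Nat) : Int) 1).foldl
              (fun c j => min (custoA f
                ((PySem.List.slice m (some (i+1)) (some ((m.length : Nat) : Int))).map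
                  (fun x => x - PySem.List.pyGetD m i 0))
                (n - PySem.List.pyGetD m i 0) j) c) 10000000
          else 0)
          = (if i < (m.length : Int) - 1 then pvV m n (i+1) ((m.length : Nat) : Int) else 0) := by
        by_cases hlt2 : i < (m.length : Int) - 1
        case neg => rw [if_neg hlt2, if_neg hlt2]
        case pos =>
          rw [if_pos hlt2, if_pos hlt2]
          have hsl : PySem.List.slice m (some (i+1)) (some ((m.length : Nat) : Int))
              = m.drop (i+1).toNat := by
            rw [PySem.List.slice_toNat m (by omega) (by omega)]
            apply List.take_of_length_le
            simp only [List.length_drop]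
            omega
          rw [hsl]
          have hmdlen : ((((m.drop (i+1).toNat).map
                (fun x => x - PySem.List.pyGetD m i 0)).length : Nat) : Int)
              = ((m.length : Nat) : Int) - (i+1) := by
            simp [List.length_drop]
            omega
          rw [hmdlen, pvV_unfold m n (i+1) ((m.length : Nat) : Int) (by omega),
              pvRange_off (i+1) ((m.length : Nat) : Int), List.foldl_map]
          apply PySem.List.foldl_congr_mem
          intro acc j hj
          rw [PySem.List.mem_pyRange_one] at hj
          have hrec := IH ((m.drop (i+1).toNat).map (fun x => x - PySem.List.pyGetD m i 0))
            (n - PySem.List.pyGetD m i 0) j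
            (by simp [List.length_drop]; omega) (by omega : 0 ≤ j)
            (by rw [hmdlen]; omega)
          rw [hrec, hmdlen]
          have b1 : pvRb m n ((m.length : Nat) : Int) = n := by
            unfold pvRb
            rw [if_pos rfl]
          have b2 : pvLb m (i+1) = PySem.List.pyGetD m i 0 := by
            unfold pvLb
            rw [if_neg (by omega), (by ring : i+1-1 = i)]
          have v1 : (if 0 < j then pvV ((m.drop (i+1).toNat).map
                (fun x => x - PySem.List.pyGetD m i 0)) (n - PySem.List.pyGetD m i 0) 0 j else 0)
              = (if i+1 < j+(i+1) then pvV m n (i+1) (j+(i+1)) else 0) := by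
            rw [if_congr (by omega : (i+1 < j+(i+1)) ↔ (0 < j)) rfl rfl]
            split_ifs with h
            · have := pvV_shift'' m n i h0 hi 0 j le_rfl (by omega)
              rw [(by ring : (0:Int)+(i+1) = i+1)] at this
              exact this
            · rfl
          have v2 : (if j < ((m.length : Nat) : Int) - (i+1) - 1 then
                pvV ((m.drop (i+1).toNat).map (fun x => x - PySem.List.pyGetD m i 0))
                  (n - PySem.List.pyGetD m i 0) (j+1) (((m.length : Nat) : Int) - (i+1)) else 0)
              = (if j+(i+1) < ((m.length : Nat) : Int) - 1 then
                  pvV m n (j+(i+1)+1) ((m.length : Nat) : Int) else 0) := by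
            rw [if_congr (by omega : (j+(i+1) < ((m.length : Nat) : Int) - 1)
                ↔ (j < ((m.length : Nat) : Int) - (i+1) - 1)) rfl rfl]
            by_cases h : j < ((m.length : Nat) : Int) - (i+1) - 1
            · rw [if_pos h, if_pos h]
              have := pvV_shift'' m n i h0 hi (j+1) (((m.length : Nat) : Int) - (i+1))
                (by omega) (by omega)
              rw [(by ring : (j+1)+(i+1) = j+(i+1)+1),
                  (by ring : ((m.length : Nat) : Int) - (i+1) + (i+1) = ((m.length : Nat) : Int))] at this
              exact this
            · rw [if_neg h, if_neg h]
          rw [v1, v2, b1, b2]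
      rw [hD]

theorem pvMin (x y : Int) : (if x < y then x else y) = min x y := by
  by_cases h : x < y
  · rw [if_pos h, min_eq_left (le_of_lt h)]
  · rw [if_neg h, min_eq_right (le_of_not_gt h)]

theorem pvFoldInv {α : Type} (f : α → Int → α) (P : Int → α → Prop) :
    ∀ (kN : Nat) (a b : Int), (b - a).toNat = kN → a ≤ b →
      (∀ s d, a ≤ s → s < b → P s d → P (s+1) (f d s)) →
      ∀ d, P a d → P b ((PySem.List.pyRange a b 1).foldl f d) := by
  intro kN
  induction kN with
  | zero =>
    intro a b hk hab hstep d hd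
    have hba : a = b := by omega
    subst hba
    rw [PySem.List.pyRange_one_eq_nil le_rfl]
    exact hd
  | succ kN IH =>
    intro a b hk hab hstep d hd
    have h : a < b := by omega
    rw [PySem.List.pyRange_one_cons h]
    simp only [List.foldl_cons]
    exact IH (a+1) b (by omega) (by omega)
      (fun s d hs1 hs2 hP => hstep s d (by omega) hs2 hP)
      (f d a) (hstep a d le_rfl h hd)

-- the table invariant: all intervals of span ≤ s are present with the spec value
def pvTab (m : List Int) (n : Int) (s : Int) (d : PySem.Dict (Int × Int) Int) : Prop :=
  ∀ lo hi : Int, 0 ≤ lo → lo < hi → hi ≤ ((m.length : Nat) : Int) → hi - lo ≤ s →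
    d.getD (lo, hi) 0 = pvV m n lo hi

theorem altBest_eq (m : List Int) (n : Int) (d : PySem.Dict (Int × Int) Int) (lo hi : Int)
    (hlo : 0 ≤ lo) (hlohi : lo < hi) (hhi : hi ≤ ((m.length : Nat) : Int))
    (hd : ∀ lo' hi', 0 ≤ lo' → lo' < hi' → hi' ≤ ((m.length : Nat) : Int) →
            hi' - lo' < hi - lo → d.getD (lo', hi') 0 = pvV m n lo' hi') :
    altBest m n ((m.length : Nat) : Int) d lo hi = pvV m n lo hi := by
  unfold altBest
  rw [pvV_unfold m n lo hi hlohi]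
  apply PySem.List.foldl_congr_mem
  intro acc j hj
  rw [PySem.List.mem_pyRange_one] at hj
  simp only [gt_iff_lt]
  have hLb : (if lo = 0 then 0 else PySem.List.pyGetD m (lo-1) 0) = pvLb m lo := rfl
  have hRb : (if hi = ((m.length : Nat) : Int) then n else PySem.List.pyGetD m hi 0)
      = pvRb m n hi := rfl
  rw [hLb, hRb]
  by_cases h1 : lo < j
  · by_cases h2 : j < hi - 1
    · simp only [eq_true h1, eq_true h2, if_true]
      rw [hd lo j hlo h1 (by omega) (by omega),
          hd (j+1) hi (by omega) (by omega) hhi (by omega)]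
      exact pvMin _ _
    · simp only [eq_true h1, eq_false h2, if_true, if_false]
      rw [hd lo j hlo h1 (by omega) (by omega), add_zero]
      exact pvMin _ _
  · by_cases h2 : j < hi - 1
    · simp only [eq_false h1, eq_true h2, if_true, if_false]
      rw [hd (j+1) hi (by omega) (by omega) hhi (by omega), add_zero]
      exact pvMin _ _
    · simp only [eq_false h1, eq_false h2, if_false]
      rw [add_zero, add_zero]
      exact pvMin _ _

theorem pvPairNe (lo hi t u : Int) (h : ¬ (lo = t ∧ hi = u)) : ((lo, hi) : Int × Int) ≠ (t, u) := by
  intro he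
  apply h
  exact ⟨congrArg Prod.fst he, congrArg Prod.snd he⟩

theorem altOuter_eq (m : List Int) (n : Int) (s : Int) (d : PySem.Dict (Int × Int) Int)
    (h1s : 1 ≤ s) (hsk : s ≤ ((m.length : Nat) : Int)) (hP : pvTab m n (s-1) d) :
    pvTab m n s (altOuter m n ((m.length : Nat) : Int) d s) := by
  unfold altOuter
  have hmain := pvFoldInv (altInner m n ((m.length : Nat) : Int) s)
    (fun t d => pvTab m n (s-1) d ∧
      ∀ lo, 0 ≤ lo → lo < t → d.getD (lo, lo+s) 0 = pvV m n lo (lo+s))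
    ((((m.length : Nat) : Int) - s + 1) - 0).toNat 0 (((m.length : Nat) : Int) - s + 1) rfl
    (by omega)
    (by
      intro t d' ht0 htk hPair
      constructor
      · intro lo hi hlo hlohi hhik hspan
        unfold altInner
        rw [PySem.Dict.getD_insert, if_neg (pvPairNe lo hi t (t+s) (by omega))]
        exact hPair.1 lo hi hlo hlohi hhik hspan
      · intro lo hlo hlot
        unfold altInner
        by_cases hcase : lo = t
        · subst hcase
          rw [PySem.Dict.getD_insert_self]
          exact altBest_eq m n d' lo (lo+s) hlo (by omega) (by omega)
            (fun lo' hi' h1 h2 h3 h4 => hPair.1 lo' hi' h1 h2 h3 (by omega))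
        · rw [PySem.Dict.getD_insert, if_neg (pvPairNe lo (lo+s) t (t+s) (by omega))]
          exact hPair.2 lo hlo (by omega)) d
    ⟨hP, by intro lo _ h; omega⟩
  intro lo hi hlo hlohi hhik hspan
  by_cases hsm : hi - lo ≤ s - 1
  · exact hmain.1 lo hi hlo hlohi hhik hsm
  · have hhi : hi = lo + s := by omega
    subst hhi
    exact hmain.2 lo hlo (by omega)

theorem alt_eq (m : List Int) (n i : Int) (h0 : 0 ≤ i) (hi : i < (m.length : Int)) :
    custominimo_alt m n i
      = n + (if 0 < i then pvV m n 0 i else 0)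
          + (if i < (m.length : Int) - 1 then pvV m n (i+1) (m.length : Int) else 0) := by
  simp only [custominimo_alt]
  by_cases h1 : m.length = 1
  · rw [if_pos h1]
    have hi0 : i = 0 := by omega
    subst hi0
    rw [h1]
    norm_num
  · rw [if_neg h1]
    have htab : pvTab m n ((m.length : Nat) : Int)
        ((PySem.List.pyRange 1 (((m.length : Nat) : Int) + 1) 1).foldl
          (altOuter m n ((m.length : Nat) : Int)) PySem.Dict.empty) := by
      have h := pvFoldInv (altOuter m n ((m.length : Nat) : Int)) (fun s d => pvTab m n (s-1) d)
        ((((m.length : Nat) : Int) + 1) - 1).toNat 1 (((m.length : Nat) : Int) + 1) rfl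
        (by omega)
        (by
          intro s d hs1 hs2 hP
          have hres := altOuter_eq m n s d hs1 (by omega) hP
          have he : s + 1 - 1 = s := by ring
          rw [he]
          exact hres)
        PySem.Dict.empty
        (by
          intro lo hi hlo hlohi _ hspan
          exact absurd hlohi (by omega))
      simp only at h
      have he2 : ((m.length : Nat) : Int) + 1 - 1 = ((m.length : Nat) : Int) := by ring
      rw [he2] at h
      exact h
    simp only [gt_iff_lt]
    by_cases hpos : 0 < i
    · by_cases hlast : i < ((m.length : Nat) : Int) - 1
      · simp only [eq_true hpos, eq_true hlast, if_true]
        rw [htab 0 i le_rfl hpos (by omega) (by omega),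
            htab (i+1) ((m.length : Nat) : Int) (by omega) (by omega) le_rfl (by omega)]
      · simp only [eq_true hpos, eq_false hlast, if_true, if_false]
        rw [htab 0 i le_rfl hpos (by omega) (by omega)]
        ring
    · by_cases hlast : i < ((m.length : Nat) : Int) - 1
      · simp only [eq_false hpos, eq_true hlast, if_true, if_false]
        rw [htab (i+1) ((m.length : Nat) : Int) (by omega) (by omega) le_rfl (by omega)]
        ring
      · simp only [eq_false hpos, eq_false hlast, if_false]
        ring

-- ===== VERDICT (by name: the statement is the Claim_ definition above) =====
theorem custominimo_spec : Claim_equal_custominimo := by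
  intro m n i _ hpre
  rcases hpre with ⟨h0, hi⟩ | h1 | ⟨hm, hge, hle⟩
  · unfold Spec_custominimo custominimo
    rw [custoA_eq (m.length + 1) m n i (by omega) h0 hi, alt_eq m n i h0 hi]
  · have ha : custoA (m.length + 1) m n i = n := by
      simp only [custoA, if_pos h1]
    have hb : custominimo_alt m n i = n := by
      simp only [custominimo_alt]
      rw [if_pos h1]
    unfold Spec_custominimo custominimo
    rw [ha, hb]
  · subst hm
    have ha : custoA (([] : List Int).length + 1) ([] : List Int) n i = n := by
      simp only [custoA, List.length_nil]
      rw [if_neg (by omega : ¬ (0:Nat) = 1),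
          if_neg (show ¬ i > 0 by omega),
          if_neg (show ¬ i < ((0:Nat) : Int) - 1 by omega)]
      ring
    have hb : custominimo_alt ([] : List Int) n i = n := by
      simp only [custominimo_alt, List.length_nil]
      rw [if_neg (by omega : ¬ (0:Nat) = 1),
          if_neg (show ¬ i > 0 by omega),
          if_neg (show ¬ i < ((0:Nat) : Int) - 1 by omega)]
    unfold Spec_custominimo custominimo
    rw [ha, hb]
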